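-- pv_equiv track=rewrite | github.com/nbrody/nbrody.github.io | python/flashBeam/button.py | p_mul
-- ===== SOURCE A (Python) =====
-- from typing import Dict, Tuple
--
-- Poly = Dict[Tuple[int, int], int]
--
-- def p_mul(a: Poly, b: Poly) -> Poly:
--     if not a or not b:
--         return {}
--     r: Dict[Tuple[int, int], int] = {}
--     for (ax, ay), ac in a.items():
--         for (bx, by), bc in b.items():
--             k = (ax + bx, ay + by)
--             r[k] = (r.get(k, 0) + ac * bc) % 3
--     return {k: v for k, v in r.items() if v}
-- ===== SOURCE B (Python) =====
-- def p_mul(a, b):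
--     # Build all cross-product terms, then reduce per distinct monomial (first-occurrence order).
--     terms = [((ax + bx, ay + by), ac * bc)
--              for (ax, ay), ac in a.items()
--              for (bx, by), bc in b.items()]
--     keys = list(dict.fromkeys(k for k, _ in terms))
--     r = {}
--     for k in keys:
--         s = sum(c for kk, c in terms if kk == k) % 3
--         if s:
--             r[k] = s
--     return r
-- ===== Notes on version B (the rewrite author's own statement) =====
-- stated objective: alternative
-- what changed: A accumulates coefficients mod 3 into a dict inside the nested loop; B first materialises the full list of cross-product terms, deduplicates the monomial keys in first-occurrence order, then sums each key's coefficients mod 3 in a separate reduction pass.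
import Mathlib
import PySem

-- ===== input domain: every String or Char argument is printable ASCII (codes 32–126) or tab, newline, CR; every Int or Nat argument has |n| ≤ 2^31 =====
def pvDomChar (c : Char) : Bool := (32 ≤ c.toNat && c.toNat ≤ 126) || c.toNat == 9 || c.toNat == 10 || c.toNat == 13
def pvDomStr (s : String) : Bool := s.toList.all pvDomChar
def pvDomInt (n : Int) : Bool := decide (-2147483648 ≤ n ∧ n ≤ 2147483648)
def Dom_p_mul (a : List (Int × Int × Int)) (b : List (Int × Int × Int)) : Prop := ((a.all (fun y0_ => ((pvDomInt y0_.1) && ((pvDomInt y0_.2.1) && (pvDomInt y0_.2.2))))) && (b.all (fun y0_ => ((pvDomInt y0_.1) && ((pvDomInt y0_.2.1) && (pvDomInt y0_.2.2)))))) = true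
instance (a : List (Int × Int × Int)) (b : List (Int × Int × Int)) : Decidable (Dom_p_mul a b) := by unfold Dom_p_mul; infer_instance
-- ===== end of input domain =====

-- B replaces A's in-place dict accumulation by a build-all-terms / dedup-keys / per-key-sum
-- pipeline (objective: alternative decomposition, not faster).

-- the dict argument as Python sees it: insertion order, a later duplicate key overwrites in place
def pvDict (l : List (Int × Int × Int)) : PySem.Dict (Int × Int) Int :=
  l.foldl (fun d t => d.insert (t.1, t.2.1) t.2.2) PySem.Dict.empty

-- ===== PORT A =====
def p_mul (a : List (Int × Int × Int)) (b : List (Int × Int × Int)) : List (Int × Int × Int) :=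
  if a = [] ∨ b = [] then []
  else
    let r := (pvDict a).items.foldl (fun r p =>
        (pvDict b).items.foldl (fun r q =>
          r.insert (p.1.1 + q.1.1, p.1.2 + q.1.2)
            (PySem.Int.mod (r.getD (p.1.1 + q.1.1, p.1.2 + q.1.2) 0 + p.2 * q.2) 3)) r)
      PySem.Dict.empty
    (r.items.filter (fun p => p.2 ≠ 0)).map (fun p => (p.1.1, p.1.2, p.2))

-- ===== PORT B =====
def p_mul_alt (a : List (Int × Int × Int)) (b : List (Int × Int × Int)) : List (Int × Int × Int) :=
  let terms := (pvDict a).items.flatMap (fun p =>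
      (pvDict b).items.map (fun q => ((p.1.1 + q.1.1, p.1.2 + q.1.2), p.2 * q.2)))
  (PySem.List.dedup (terms.map (·.1))).filterMap (fun k =>
    let s := PySem.Int.mod (((terms.filter (fun t => t.1 = k)).map (·.2)).sum) 3
    if s ≠ 0 then some (k.1, k.2, s) else none)

-- ===== PRECONDITION & SPEC =====
def Spec_p_mul (a : List (Int × Int × Int)) (b : List (Int × Int × Int)) (out : List (Int × Int × Int)) : Prop := out = p_mul_alt a b
instance (a : List (Int × Int × Int)) (b : List (Int × Int × Int)) (out : List (Int × Int × Int)) : Decidable (Spec_p_mul a b out) := by unfold Spec_p_mul; infer_instance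

-- ===== CLAIM (what is proved, stated in full; the proofs are below) =====
def Claim_equal_p_mul : Prop := ∀ (a : List (Int × Int × Int)) (b : List (Int × Int × Int)), Dom_p_mul a b → Spec_p_mul a b (p_mul a b)

-- ===== LEMMAS AND PROOFS =====

-- A's accumulation step, over one product term
def pvStep (r : PySem.Dict (Int × Int) Int) (t : (Int × Int) × Int) : PySem.Dict (Int × Int) Int :=
  r.insert t.1 (PySem.Int.mod (r.getD t.1 0 + t.2) 3)

-- keys of the accumulated dict = term keys deduplicated in first-occurrence order
theorem pvKeys (T : List ((Int × Int) × Int)) :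
    (T.foldl pvStep PySem.Dict.empty).keys = PySem.Set.ofList (T.map (·.1)) := by
  have h := PySem.Dict.keys_foldl_insert_key T (fun t => t.1)
      (fun d t => PySem.Int.mod (d.getD t.1 0 + t.2) 3) PySem.Dict.empty
  show (T.foldl (fun d t => d.insert t.1 (PySem.Int.mod (d.getD t.1 0 + t.2) 3))
      PySem.Dict.empty).keys = _
  rw [h, PySem.Dict.keys_empty]
  have := PySem.Set.ofList_append ([] : List (Int × Int)) (T.map (·.1))
  simpa [PySem.Set.ofList_nil] using this.symm

-- the accumulated value at k is the mod-3 sum of all coefficients produced with key k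
theorem pvVal (T : List ((Int × Int) × Int)) (k : Int × Int) :
    (T.foldl pvStep PySem.Dict.empty).getD k 0
      = PySem.Int.mod (((T.filter (fun t => t.1 = k)).map (·.2)).sum) 3 := by
  induction T using List.reverseRecOn with
  | nil => simp [PySem.Dict.getD_empty, PySem.Int.mod]
  | append_singleton T t ih =>
    rw [List.foldl_append]
    simp only [List.foldl_cons, List.foldl_nil]
    by_cases hk : t.1 = k
    · subst hk
      simp only [pvStep, PySem.Dict.getD_insert_self, List.filter_append, List.map_append,
        List.sum_append, ih]
      simp only [List.filter_cons, List.filter_nil, decide_true, if_true]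
      rw [PySem.Int.mod_eq_emod_of_pos (by norm_num), PySem.Int.mod_eq_emod_of_pos (by norm_num)]
      simp
    · simp only [pvStep]
      rw [PySem.Dict.getD_insert_of_ne _ _ _ (fun h => hk h.symm)]
      rw [ih]
      congr 1
      simp [List.filter_append, hk]

-- A's final nonzero-filter over the value table = B's per-key filterMap
theorem pvOut (K : List (Int × Int)) (v : (Int × Int) → Int) :
    ((K.map (fun k => (k, v k))).filter (fun p => p.2 ≠ 0)).map (fun p => (p.1.1, p.1.2, p.2))
      = K.filterMap (fun k => if v k ≠ 0 then some (k.1, k.2, v k) else none) := by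
  induction K with
  | nil => rfl
  | cons k K ih =>
    simp only [List.map_cons, List.filter_cons, List.filterMap_cons]
    simp only [ne_eq, decide_not, ite_not] at ih
    by_cases h : v k = 0
    · simp [h, ih]
    · simp [h, ih]

theorem pvMain (a b : List (Int × Int × Int)) : p_mul a b = p_mul_alt a b := by
  simp only [p_mul, p_mul_alt]
  by_cases hab : a = [] ∨ b = []
  · rw [if_pos hab]
    rcases hab with h | h <;> subst h <;> simp [pvDict, PySem.Dict.empty]
  · rw [if_neg hab]
    set T := (pvDict a).items.flatMap (fun p =>
      (pvDict b).items.map (fun q => ((p.1.1 + q.1.1, p.1.2 + q.1.2), p.2 * q.2))) with hTdef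
    have hfold : (pvDict a).items.foldl (fun r p =>
        (pvDict b).items.foldl (fun r q =>
          r.insert (p.1.1 + q.1.1, p.1.2 + q.1.2)
            (PySem.Int.mod (r.getD (p.1.1 + q.1.1, p.1.2 + q.1.2) 0 + p.2 * q.2) 3)) r)
        PySem.Dict.empty = T.foldl pvStep PySem.Dict.empty := by
      rw [hTdef, List.foldl_flatMap]
      simp only [List.foldl_map]
      rfl
    rw [hfold]
    have hnd : (T.foldl pvStep PySem.Dict.empty).keys.Nodup := by
      rw [pvKeys]; exact PySem.Set.nodup_ofList _
    rw [PySem.Dict.items_eq_map_keys _ hnd 0, pvKeys]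
    rw [pvOut]
    simp only [PySem.List.dedup_eq_ofList]
    refine List.filterMap_congr ?_
    intro k hk
    rw [pvVal]

-- ===== VERDICT (by name: the statement is the Claim_ definition above) =====
theorem p_mul_spec : Claim_equal_p_mul := by
  intro a b _
  unfold Spec_p_mul
  exact pvMain a b
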